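-- pv_equiv track=rewrite | github.com/zdravkob98/Python-Advanced-September-2020 | Python Advanced Exam - 23 February 2020/02. War Planes.py | find_targets
-- ===== SOURCE A (Python) =====
-- def find_targets(matrix, rows):
--     flag = True
--     targets_left = 0
--     targets = 0
--     for i in range(rows):
--         for j in range(rows):
--             if matrix[i][j] != 'p' and matrix[i][j] != '.' and matrix[i][j] != 'x':
--                 targets_left += 1
--                 flag = False
--             if matrix[i][j] == 'x':
--                 targets += 1
--     if flag:
--         return targets
--     else:
--         return targets_left
-- ===== SOURCE B (Python) =====
-- def find_targets(matrix, rows):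
--     def counts(i):
--         if i >= rows:
--             return (0, 0)
--         others, xs = counts(i + 1)
--         row = matrix[i][:rows]
--         return (others + sum(c not in ('p', '.', 'x') for c in row),
--                 xs + row.count('x'))
--     others, xs = counts(0)
--     return others if others else xs
-- ===== Notes on version B (the rewrite author's own statement) =====
-- stated objective: alternative
-- what changed: Replaces the flag and two accumulators threaded through nested index loops by a recursion over row indices that slices each row to the first `rows` cells and combines per-row builtin counts (sum of a membership test and list.count('x')) back-to-front; the flag becomes 'others == 0' on the final pair.
import Mathlib
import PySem

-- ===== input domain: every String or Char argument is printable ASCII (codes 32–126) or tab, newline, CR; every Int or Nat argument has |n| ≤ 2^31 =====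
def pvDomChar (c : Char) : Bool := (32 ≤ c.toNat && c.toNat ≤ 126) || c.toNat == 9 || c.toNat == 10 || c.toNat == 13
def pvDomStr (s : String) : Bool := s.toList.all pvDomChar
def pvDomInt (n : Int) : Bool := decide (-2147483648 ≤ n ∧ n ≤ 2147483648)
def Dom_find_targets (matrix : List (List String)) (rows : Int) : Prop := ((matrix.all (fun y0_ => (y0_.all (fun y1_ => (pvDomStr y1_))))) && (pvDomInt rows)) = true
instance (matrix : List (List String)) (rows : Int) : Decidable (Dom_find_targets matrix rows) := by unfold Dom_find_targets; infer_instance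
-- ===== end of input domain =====

-- B replaces A's flag and twin accumulators threaded through nested index loops by a
-- recursion over row indices that slices each row to `rows` cells and combines
-- per-row builtin counts back-to-front (alternative decomposition; same asymptotic cost).


-- ===== PORT A =====
def find_targets (matrix : List (List String)) (rows : Int) : Int :=
  let r := (PySem.List.pyRange 0 rows 1).foldl (fun (s : Bool × Int × Int) i =>
      (PySem.List.pyRange 0 rows 1).foldl (fun (s : Bool × Int × Int) j =>
        let c := PySem.List.pyGetD (PySem.List.pyGetD matrix i []) j ""
        let s := if c ≠ "p" ∧ c ≠ "." ∧ c ≠ "x" then (false, s.2.1 + 1, s.2.2) else s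
        if c = "x" then (s.1, s.2.1, s.2.2 + 1) else s) s)
    (true, 0, 0)
  if r.1 then r.2.2 else r.2.1

-- ===== PORT B =====
-- the inner recursion `counts(i)` of Source B (terminates since rows - i shrinks)
def pvCounts (matrix : List (List String)) (rows : Int) (i : Int) : Int × Int :=
  if h : rows ≤ i then (0, 0)
  else
    let p := pvCounts matrix rows (i + 1)
    let row := PySem.List.slice (PySem.List.pyGetD matrix i []) none (some rows)
    (p.1 + ((row.countP (fun c => decide (c ≠ "p" ∧ c ≠ "." ∧ c ≠ "x"))) : Int),
     p.2 + ((row.count "x") : Int))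
  termination_by (rows - i).toNat
  decreasing_by omega

def find_targets_alt (matrix : List (List String)) (rows : Int) : Int :=
  let p := pvCounts matrix rows 0
  if p.1 ≠ 0 then p.1 else p.2

-- ===== PRECONDITION & SPEC =====
-- Pre_: the Python A raises IndexError unless the first `rows` rows exist and each has
-- at least `rows` cells (vacuous for rows ≤ 0, where the loops do not run).
def Pre_find_targets (matrix : List (List String)) (rows : Int) : Prop :=
  rows ≤ (matrix.length : Int) ∧ ∀ row ∈ matrix.take rows.toNat, rows ≤ (row.length : Int)
instance (matrix : List (List String)) (rows : Int) : Decidable (Pre_find_targets matrix rows) := by unfold Pre_find_targets; infer_instance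
def pvWitness_find_targets : List (List String) × Int := ([["x", "p"], [".", "#"]], 2)
def Spec_find_targets (matrix : List (List String)) (rows : Int) (out : Int) : Prop := out = find_targets_alt matrix rows
instance (matrix : List (List String)) (rows : Int) (out : Int) : Decidable (Spec_find_targets matrix rows out) := by unfold Spec_find_targets; infer_instance

-- ===== CLAIM (what is proved, stated in full; the proofs are below) =====
def Claim_equal_find_targets : Prop := ∀ (matrix : List (List String)) (rows : Int), Dom_find_targets matrix rows → Pre_find_targets matrix rows → Spec_find_targets matrix rows (find_targets matrix rows)

-- ===== LEMMAS AND PROOFS =====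

-- the per-cell test, as a Bool predicate over a cell
def pvOther (c : String) : Bool := decide (c ≠ "p" ∧ c ≠ "." ∧ c ≠ "x")

-- A's loop body over one cell
def pvBody (s : Bool × Int × Int) (c : String) : Bool × Int × Int :=
  let s := if c ≠ "p" ∧ c ≠ "." ∧ c ≠ "x" then (false, s.2.1 + 1, s.2.2) else s
  if c = "x" then (s.1, s.2.1, s.2.2 + 1) else s

-- characterisation of A's fold over an arbitrary list of cells
theorem pvFold_char (cells : List String) (f : Bool) (tl t : Int) :
    cells.foldl pvBody (f, tl, t) =
      (f && decide (cells.countP pvOther = 0),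
       tl + (cells.countP pvOther : Int), t + (cells.count "x" : Int)) := by
  induction cells generalizing f tl t with
  | nil => simp
  | cons c cs ih =>
    simp only [List.foldl_cons, List.countP_cons, List.count_cons, pvBody, pvOther]
    by_cases hx : c = "x"
    · subst hx
      simp only [ih]
      simp [pvOther]
      omega
    · by_cases ho : c ≠ "p" ∧ c ≠ "." ∧ c ≠ "x"
      · simp only [if_pos ho, if_neg hx, ih]
        simp [pvOther, ho]
        omega
      · have hpd : c = "p" ∨ c = "." := by tauto
        rcases hpd with h | h <;> subst h <;> simp [pvOther, ih]

-- the cells B's recursion sees from row index i onward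
def pvCellsFrom (matrix : List (List String)) (rows i : Int) : List String :=
  (PySem.List.pyRange i rows 1).flatMap
    (fun k => PySem.List.slice (PySem.List.pyGetD matrix k []) none (some rows))

-- characterisation of B's recursion
theorem pvCounts_char (matrix : List (List String)) (rows i : Int) :
    pvCounts matrix rows i =
      (((pvCellsFrom matrix rows i).countP pvOther : Int),
       ((pvCellsFrom matrix rows i).count "x" : Int)) := by
  by_cases h : rows ≤ i
  · rw [pvCounts, dif_pos h]
    simp [pvCellsFrom, PySem.List.pyRange_one_eq_nil h]
  · rw [pvCounts, dif_neg h]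
    have hlt : i < rows := by omega
    have ih := pvCounts_char matrix rows (i + 1)
    simp only [ih, pvCellsFrom, PySem.List.pyRange_one_cons hlt, List.flatMap_cons,
      List.countP_append, List.count_append]
    have hfun : (fun c => decide (c ≠ "p" ∧ c ≠ "." ∧ c ≠ "x")) = pvOther := rfl
    rw [hfun]
    simp only [Prod.mk.injEq]
    refine ⟨?_, ?_⟩ <;> (push_cast; ring_nf)
  termination_by (rows - i).toNat
  decreasing_by omega

-- for a row long enough, the slice row[:rows] is exactly the cells A indexes
theorem pvRow_eq (row : List String) (rows : Int) (h0 : 0 ≤ rows)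
    (h : rows ≤ (row.length : Int)) :
    (PySem.List.pyRange 0 rows 1).map (fun j => PySem.List.pyGetD row j "")
      = PySem.List.slice row none (some rows) := by
  rw [PySem.List.slice_to row h0, PySem.List.pyRange_one]
  simp only [Int.sub_zero] at *
  apply List.ext_getElem
  · simp; omega
  · intro k h1 h2
    simp only [List.getElem_map, List.getElem_range, List.getElem_take]
    rw [PySem.List.pyGetD_eq_getElem]
    · simp
    · omega
    · simp at h1; omega

theorem find_targets_eq_alt (matrix : List (List String)) (rows : Int)
    (hpre : Pre_find_targets matrix rows) :
    find_targets matrix rows = find_targets_alt matrix rows := by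
  obtain ⟨hlen, hrows⟩ := hpre
  unfold find_targets find_targets_alt
  rw [pvCounts_char]
  set R := PySem.List.pyRange 0 rows 1 with hR
  have hinner : ∀ (s : Bool × Int × Int) (i : Int), i ∈ R →
      R.foldl (fun (s : Bool × Int × Int) j =>
          let c := PySem.List.pyGetD (PySem.List.pyGetD matrix i []) j ""
          let s := if c ≠ "p" ∧ c ≠ "." ∧ c ≠ "x" then (false, s.2.1 + 1, s.2.2) else s
          if c = "x" then (s.1, s.2.1, s.2.2 + 1) else s) s
        = (PySem.List.slice (PySem.List.pyGetD matrix i []) none (some rows)).foldl pvBody s := by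
    intro s i hi
    rw [hR, PySem.List.mem_pyRange_one] at hi
    have hrow : rows ≤ ((PySem.List.pyGetD matrix i []).length : Int) := by
      have hget : PySem.List.pyGetD matrix i [] = matrix[i.toNat]'(by omega) := by
        exact PySem.List.pyGetD_eq_getElem matrix [] hi.1 (by omega)
      apply hrows
      rw [hget]
      apply List.mem_take_iff_getElem.2
      exact ⟨i.toNat, by omega, rfl⟩
    rw [← pvRow_eq _ rows (by omega) hrow, List.foldl_map]
    rfl
  have hfold :
      R.foldl (fun (s : Bool × Int × Int) i =>
        R.foldl (fun (s : Bool × Int × Int) j =>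
          let c := PySem.List.pyGetD (PySem.List.pyGetD matrix i []) j ""
          let s := if c ≠ "p" ∧ c ≠ "." ∧ c ≠ "x" then (false, s.2.1 + 1, s.2.2) else s
          if c = "x" then (s.1, s.2.1, s.2.2 + 1) else s) s)
        ((true : Bool), (0 : Int), (0 : Int))
      = (pvCellsFrom matrix rows 0).foldl pvBody (true, 0, 0) := by
    rw [pvCellsFrom, List.foldl_flatMap]
    exact PySem.List.foldl_congr_mem _ _ _ _ (fun s i hi => hinner s i hi)
  rw [hfold, pvFold_char]
  by_cases hz : (pvCellsFrom matrix rows 0).countP pvOther = 0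
  · simp only [hz, decide_true, Bool.and_true, if_true, Nat.cast_zero, zero_add]
    rw [if_neg (by simp)]
  · simp only [hz, decide_false, Bool.and_false, Bool.false_eq_true, if_false, zero_add]
    rw [if_pos (by simpa using hz)]

-- ===== VERDICT (by name: the statement is the Claim_ definition above) =====
theorem find_targets_spec : Claim_equal_find_targets := by
  intro matrix rows _ hpre
  exact find_targets_eq_alt matrix rows hpre
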